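-- pv_equiv track=rewrite | github.com/JingxuanZhang77/QuantVLA_GR00T | scripts/scan_linear_layers.py | group_by_component
-- ===== SOURCE A (Python) =====
-- def group_by_component(layers):
--     """Group layers by model component (LLM, DiT, etc.)."""
--     groups = {
--         'vlm': [],           # Vision-Language Model backbone
--         'vision': [],        # Vision encoder
--         'llm_attn': [],      # LLM attention layers
--         'llm_mlp': [],       # LLM MLP layers
--         'dit_attn': [],      # DiT attention layers
--         'dit_mlp': [],       # DiT MLP layers
--         'action_head': [],   # Action prediction head
--         'other': [],
--     }
--
--     for layer in layers:
--         name = layer['name']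
--
--         # Vision encoder
--         if 'vision' in name.lower() or 'siglip' in name.lower() or 'radio' in name.lower():
--             groups['vision'].append(layer)
--         # VLM/LLM attention
--         elif ('vlm' in name.lower() or 'language' in name.lower() or 'qwen' in name.lower() or 'eagle' in name.lower()) and \
--              any(x in name.lower() for x in ['q_proj', 'k_proj', 'v_proj', 'o_proj', 'qkv', 'attn']):
--             groups['llm_attn'].append(layer)
--         # VLM/LLM MLP
--         elif ('vlm' in name.lower() or 'language' in name.lower() or 'qwen' in name.lower() or 'eagle' in name.lower()) and \
--              any(x in name.lower() for x in ['mlp', 'fc', 'gate_proj', 'up_proj', 'down_proj']):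
--             groups['llm_mlp'].append(layer)
--         # DiT attention
--         elif ('dit' in name.lower() or 'diffusion' in name.lower()) and \
--              any(x in name.lower() for x in ['q_proj', 'k_proj', 'v_proj', 'o_proj', 'qkv', 'attn']):
--             groups['dit_attn'].append(layer)
--         # DiT MLP
--         elif ('dit' in name.lower() or 'diffusion' in name.lower()) and \
--              any(x in name.lower() for x in ['mlp', 'fc', 'gate_proj', 'up_proj', 'down_proj']):
--             groups['dit_mlp'].append(layer)
--         # Action head
--         elif 'action' in name.lower() or 'head' in name.lower():
--             groups['action_head'].append(layer)
--         # VLM backbone (catch-all for remaining VLM layers)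
--         elif any(x in name.lower() for x in ['vlm', 'language', 'qwen', 'eagle']):
--             groups['vlm'].append(layer)
--         else:
--             groups['other'].append(layer)
--
--     return groups
-- ===== SOURCE B (Python) =====
-- ATTN = ('q_proj', 'k_proj', 'v_proj', 'o_proj', 'qkv', 'attn')
-- MLP = ('mlp', 'fc', 'gate_proj', 'up_proj', 'down_proj')
-- LLM = ('vlm', 'language', 'qwen', 'eagle')
-- DIT = ('dit', 'diffusion')
--
-- # priority-ordered rule table: (component keywords, type keywords or None, group)
-- RULES = [
--     (('vision', 'siglip', 'radio'), None, 'vision'),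
--     (LLM, ATTN, 'llm_attn'),
--     (LLM, MLP, 'llm_mlp'),
--     (DIT, ATTN, 'dit_attn'),
--     (DIT, MLP, 'dit_mlp'),
--     (('action', 'head'), None, 'action_head'),
--     (LLM, None, 'vlm'),
-- ]
--
-- GROUP_KEYS = ['vlm', 'vision', 'llm_attn', 'llm_mlp', 'dit_attn', 'dit_mlp', 'action_head', 'other']
--
--
-- def _classify(layer):
--     lname = layer['name'].lower()
--     for comps, types, group in RULES:
--         if any(c in lname for c in comps) and (types is None or any(t in lname for t in types)):
--             return group
--     return 'other'
--
--
-- def group_by_component(layers):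
--     """Group layers by model component (LLM, DiT, etc.)."""
--     return {k: [layer for layer in layers if _classify(layer) == k] for k in GROUP_KEYS}
-- ===== Notes on version B (the rewrite author's own statement) =====
-- stated objective: idiomatic
-- what changed: B replaces A's single-pass if/elif cascade that mutates a groups dict by a classify function driven by a priority-ordered rule table of (component keywords, type keywords) plus one filtering dict comprehension per group key.
import Mathlib
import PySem

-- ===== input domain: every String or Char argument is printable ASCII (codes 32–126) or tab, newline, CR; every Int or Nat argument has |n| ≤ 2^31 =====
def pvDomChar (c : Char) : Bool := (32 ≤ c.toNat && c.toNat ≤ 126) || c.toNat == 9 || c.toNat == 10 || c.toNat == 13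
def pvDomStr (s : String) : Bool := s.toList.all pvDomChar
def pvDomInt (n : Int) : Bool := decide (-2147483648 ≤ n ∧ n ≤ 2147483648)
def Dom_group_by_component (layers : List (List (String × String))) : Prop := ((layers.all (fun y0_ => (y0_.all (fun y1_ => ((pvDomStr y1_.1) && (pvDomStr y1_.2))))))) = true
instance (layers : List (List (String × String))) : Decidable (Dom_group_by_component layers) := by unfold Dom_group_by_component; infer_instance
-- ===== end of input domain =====

-- B replaces A's single-pass if/elif cascade by a classify function driven by a
-- priority-ordered rule table plus one filtering comprehension per group key (idiomatic).

-- ===== PORT A =====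
-- layer['name'] (dict lookup; Pre_ guarantees the key exists)
def pvNameOf (layer : List (String × String)) : String :=
  ((PySem.Dict.mk layer).get? "name").getD ""

-- the loop body of A: the if/elif cascade appending to groups[...]
def pvStepA (g : PySem.Dict String (List (List (String × String))))
    (layer : List (String × String)) : PySem.Dict String (List (List (String × String))) :=
  let name := pvNameOf layer
  if PySem.Str.isIn "vision" (PySem.Str.lower name) || PySem.Str.isIn "siglip" (PySem.Str.lower name) || PySem.Str.isIn "radio" (PySem.Str.lower name) then
    g.modify "vision" [] (· ++ [layer])
  else if (PySem.Str.isIn "vlm" (PySem.Str.lower name) || PySem.Str.isIn "language" (PySem.Str.lower name) || PySem.Str.isIn "qwen" (PySem.Str.lower name) || PySem.Str.isIn "eagle" (PySem.Str.lower name)) &&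
      (["q_proj", "k_proj", "v_proj", "o_proj", "qkv", "attn"].any (fun x => PySem.Str.isIn x (PySem.Str.lower name))) then
    g.modify "llm_attn" [] (· ++ [layer])
  else if (PySem.Str.isIn "vlm" (PySem.Str.lower name) || PySem.Str.isIn "language" (PySem.Str.lower name) || PySem.Str.isIn "qwen" (PySem.Str.lower name) || PySem.Str.isIn "eagle" (PySem.Str.lower name)) &&
      (["mlp", "fc", "gate_proj", "up_proj", "down_proj"].any (fun x => PySem.Str.isIn x (PySem.Str.lower name))) then
    g.modify "llm_mlp" [] (· ++ [layer])
  else if (PySem.Str.isIn "dit" (PySem.Str.lower name) || PySem.Str.isIn "diffusion" (PySem.Str.lower name)) &&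
      (["q_proj", "k_proj", "v_proj", "o_proj", "qkv", "attn"].any (fun x => PySem.Str.isIn x (PySem.Str.lower name))) then
    g.modify "dit_attn" [] (· ++ [layer])
  else if (PySem.Str.isIn "dit" (PySem.Str.lower name) || PySem.Str.isIn "diffusion" (PySem.Str.lower name)) &&
      (["mlp", "fc", "gate_proj", "up_proj", "down_proj"].any (fun x => PySem.Str.isIn x (PySem.Str.lower name))) then
    g.modify "dit_mlp" [] (· ++ [layer])
  else if PySem.Str.isIn "action" (PySem.Str.lower name) || PySem.Str.isIn "head" (PySem.Str.lower name) then
    g.modify "action_head" [] (· ++ [layer])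
  else if ["vlm", "language", "qwen", "eagle"].any (fun x => PySem.Str.isIn x (PySem.Str.lower name)) then
    g.modify "vlm" [] (· ++ [layer])
  else
    g.modify "other" [] (· ++ [layer])

def group_by_component (layers : List (List (String × String))) : List (String × List (List (String × String))) :=
  let groups : PySem.Dict String (List (List (String × String))) :=
    PySem.Dict.mk [("vlm", []), ("vision", []), ("llm_attn", []), ("llm_mlp", []),
                   ("dit_attn", []), ("dit_mlp", []), ("action_head", []), ("other", [])]
  (layers.foldl pvStepA groups).items

-- ===== PORT B =====
def pvAnyIn (kws : List String) (s : String) : Bool := kws.any (fun k => PySem.Str.isIn k s)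

def pvATTN : List String := ["q_proj", "k_proj", "v_proj", "o_proj", "qkv", "attn"]
def pvMLP : List String := ["mlp", "fc", "gate_proj", "up_proj", "down_proj"]
def pvLLM : List String := ["vlm", "language", "qwen", "eagle"]
def pvDIT : List String := ["dit", "diffusion"]

-- priority-ordered rule table: (component keywords, type keywords or none, group)
def pvRules : List (List String × Option (List String) × String) :=
  [(["vision", "siglip", "radio"], none, "vision"),
   (pvLLM, some pvATTN, "llm_attn"),
   (pvLLM, some pvMLP, "llm_mlp"),
   (pvDIT, some pvATTN, "dit_attn"),
   (pvDIT, some pvMLP, "dit_mlp"),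
   (["action", "head"], none, "action_head"),
   (pvLLM, none, "vlm")]

def pvGroupKeys : List String :=
  ["vlm", "vision", "llm_attn", "llm_mlp", "dit_attn", "dit_mlp", "action_head", "other"]

def pvClassify (layer : List (String × String)) : String :=
  let lname := PySem.Str.lower (((PySem.Dict.mk layer).get? "name").getD "")
  (pvRules.findSome? (fun r =>
      if pvAnyIn r.1 lname && (match r.2.1 with | none => true | some ts => pvAnyIn ts lname)
      then some r.2.2 else none)).getD "other"

def group_by_component_alt (layers : List (List (String × String))) : List (String × List (List (String × String))) :=
  pvGroupKeys.map (fun k => (k, layers.filter (fun layer => pvClassify layer == k)))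

-- ===== PRECONDITION & SPEC =====
-- Pre_ excludes exactly the layers without a 'name' key, on which A raises KeyError.
def Pre_group_by_component (layers : List (List (String × String))) : Prop :=
  (layers.all (fun layer => layer.any (fun p => p.1 == "name"))) = true
instance (layers : List (List (String × String))) : Decidable (Pre_group_by_component layers) := by unfold Pre_group_by_component; infer_instance

def pvWitness_group_by_component : (List (List (String × String))) :=
  [[("name", "backbone.vision_model.fc1")], [("name", "qwen.layers.0.self_attn.q_proj")]]

def Spec_group_by_component (layers : List (List (String × String))) (out : List (String × List (List (String × String)))) : Prop := out = group_by_component_alt layers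
instance (layers : List (List (String × String))) (out : List (String × List (List (String × String)))) : Decidable (Spec_group_by_component layers out) := by unfold Spec_group_by_component; infer_instance

-- ===== CLAIM (what is proved, stated in full; the proofs are below) =====
def Claim_equal_group_by_component : Prop := ∀ (layers : List (List (String × String))), Dom_group_by_component layers → Pre_group_by_component layers → Spec_group_by_component layers (group_by_component layers)

-- ===== LEMMAS AND PROOFS =====

theorem pvmod_vlm (v1 v2 v3 v4 v5 v6 v7 v8 : List (List (String × String))) (a : List (String × String)) :
    (PySem.Dict.mk [("vlm", v1), ("vision", v2), ("llm_attn", v3), ("llm_mlp", v4), ("dit_attn", v5), ("dit_mlp", v6), ("action_head", v7), ("other", v8)]).modify "vlm" [] (· ++ [a])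
    = PySem.Dict.mk [("vlm", v1 ++ [a]), ("vision", v2), ("llm_attn", v3), ("llm_mlp", v4), ("dit_attn", v5), ("dit_mlp", v6), ("action_head", v7), ("other", v8)] := by
  simp [PySem.Dict.modify, PySem.Dict.insert, PySem.Dict.getD, PySem.Dict.get?, PySem.Dict.contains]

theorem pvmod_vision (v1 v2 v3 v4 v5 v6 v7 v8 : List (List (String × String))) (a : List (String × String)) :
    (PySem.Dict.mk [("vlm", v1), ("vision", v2), ("llm_attn", v3), ("llm_mlp", v4), ("dit_attn", v5), ("dit_mlp", v6), ("action_head", v7), ("other", v8)]).modify "vision" [] (· ++ [a])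
    = PySem.Dict.mk [("vlm", v1), ("vision", v2 ++ [a]), ("llm_attn", v3), ("llm_mlp", v4), ("dit_attn", v5), ("dit_mlp", v6), ("action_head", v7), ("other", v8)] := by
  simp [PySem.Dict.modify, PySem.Dict.insert, PySem.Dict.getD, PySem.Dict.get?, PySem.Dict.contains]

theorem pvmod_llm_attn (v1 v2 v3 v4 v5 v6 v7 v8 : List (List (String × String))) (a : List (String × String)) :
    (PySem.Dict.mk [("vlm", v1), ("vision", v2), ("llm_attn", v3), ("llm_mlp", v4), ("dit_attn", v5), ("dit_mlp", v6), ("action_head", v7), ("other", v8)]).modify "llm_attn" [] (· ++ [a])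
    = PySem.Dict.mk [("vlm", v1), ("vision", v2), ("llm_attn", v3 ++ [a]), ("llm_mlp", v4), ("dit_attn", v5), ("dit_mlp", v6), ("action_head", v7), ("other", v8)] := by
  simp [PySem.Dict.modify, PySem.Dict.insert, PySem.Dict.getD, PySem.Dict.get?, PySem.Dict.contains]

theorem pvmod_llm_mlp (v1 v2 v3 v4 v5 v6 v7 v8 : List (List (String × String))) (a : List (String × String)) :
    (PySem.Dict.mk [("vlm", v1), ("vision", v2), ("llm_attn", v3), ("llm_mlp", v4), ("dit_attn", v5), ("dit_mlp", v6), ("action_head", v7), ("other", v8)]).modify "llm_mlp" [] (· ++ [a])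
    = PySem.Dict.mk [("vlm", v1), ("vision", v2), ("llm_attn", v3), ("llm_mlp", v4 ++ [a]), ("dit_attn", v5), ("dit_mlp", v6), ("action_head", v7), ("other", v8)] := by
  simp [PySem.Dict.modify, PySem.Dict.insert, PySem.Dict.getD, PySem.Dict.get?, PySem.Dict.contains]

theorem pvmod_dit_attn (v1 v2 v3 v4 v5 v6 v7 v8 : List (List (String × String))) (a : List (String × String)) :
    (PySem.Dict.mk [("vlm", v1), ("vision", v2), ("llm_attn", v3), ("llm_mlp", v4), ("dit_attn", v5), ("dit_mlp", v6), ("action_head", v7), ("other", v8)]).modify "dit_attn" [] (· ++ [a])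
    = PySem.Dict.mk [("vlm", v1), ("vision", v2), ("llm_attn", v3), ("llm_mlp", v4), ("dit_attn", v5 ++ [a]), ("dit_mlp", v6), ("action_head", v7), ("other", v8)] := by
  simp [PySem.Dict.modify, PySem.Dict.insert, PySem.Dict.getD, PySem.Dict.get?, PySem.Dict.contains]

theorem pvmod_dit_mlp (v1 v2 v3 v4 v5 v6 v7 v8 : List (List (String × String))) (a : List (String × String)) :
    (PySem.Dict.mk [("vlm", v1), ("vision", v2), ("llm_attn", v3), ("llm_mlp", v4), ("dit_attn", v5), ("dit_mlp", v6), ("action_head", v7), ("other", v8)]).modify "dit_mlp" [] (· ++ [a])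
    = PySem.Dict.mk [("vlm", v1), ("vision", v2), ("llm_attn", v3), ("llm_mlp", v4), ("dit_attn", v5), ("dit_mlp", v6 ++ [a]), ("action_head", v7), ("other", v8)] := by
  simp [PySem.Dict.modify, PySem.Dict.insert, PySem.Dict.getD, PySem.Dict.get?, PySem.Dict.contains]

theorem pvmod_action_head (v1 v2 v3 v4 v5 v6 v7 v8 : List (List (String × String))) (a : List (String × String)) :
    (PySem.Dict.mk [("vlm", v1), ("vision", v2), ("llm_attn", v3), ("llm_mlp", v4), ("dit_attn", v5), ("dit_mlp", v6), ("action_head", v7), ("other", v8)]).modify "action_head" [] (· ++ [a])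
    = PySem.Dict.mk [("vlm", v1), ("vision", v2), ("llm_attn", v3), ("llm_mlp", v4), ("dit_attn", v5), ("dit_mlp", v6), ("action_head", v7 ++ [a]), ("other", v8)] := by
  simp [PySem.Dict.modify, PySem.Dict.insert, PySem.Dict.getD, PySem.Dict.get?, PySem.Dict.contains]

theorem pvmod_other (v1 v2 v3 v4 v5 v6 v7 v8 : List (List (String × String))) (a : List (String × String)) :
    (PySem.Dict.mk [("vlm", v1), ("vision", v2), ("llm_attn", v3), ("llm_mlp", v4), ("dit_attn", v5), ("dit_mlp", v6), ("action_head", v7), ("other", v8)]).modify "other" [] (· ++ [a])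
    = PySem.Dict.mk [("vlm", v1), ("vision", v2), ("llm_attn", v3), ("llm_mlp", v4), ("dit_attn", v5), ("dit_mlp", v6), ("action_head", v7), ("other", v8 ++ [a])] := by
  simp [PySem.Dict.modify, PySem.Dict.insert, PySem.Dict.getD, PySem.Dict.get?, PySem.Dict.contains]


-- A's cascade picks exactly the group pvClassify computes
set_option maxHeartbeats 1000000 in
theorem stepA_eq_modify_classify (g : PySem.Dict String (List (List (String × String))))
    (layer : List (String × String)) :
    pvStepA g layer = g.modify (pvClassify layer) [] (· ++ [layer]) := by
  unfold pvStepA pvClassify pvRules pvAnyIn pvLLM pvATTN pvMLP pvDIT pvNameOf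
  simp only [List.findSome?_cons, List.findSome?_nil, List.any_cons, List.any_nil,
    Bool.or_false, Bool.and_true, Bool.or_assoc]
  split_ifs <;> rfl

set_option maxHeartbeats 1000000 in
theorem classify_mem (layer : List (String × String)) : pvClassify layer ∈ pvGroupKeys := by
  unfold pvClassify pvRules pvGroupKeys
  simp only [List.findSome?_cons, List.findSome?_nil]
  split_ifs <;> simp

theorem loop_items (layers : List (List (String × String)))
    (v1 v2 v3 v4 v5 v6 v7 v8 : List (List (String × String))) :
    (layers.foldl (fun g l => g.modify (pvClassify l) [] (· ++ [l]))
      (PySem.Dict.mk [("vlm", v1), ("vision", v2), ("llm_attn", v3), ("llm_mlp", v4),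
                      ("dit_attn", v5), ("dit_mlp", v6), ("action_head", v7), ("other", v8)])).items
    = [("vlm", v1 ++ layers.filter (fun l => pvClassify l == "vlm")),
       ("vision", v2 ++ layers.filter (fun l => pvClassify l == "vision")),
       ("llm_attn", v3 ++ layers.filter (fun l => pvClassify l == "llm_attn")),
       ("llm_mlp", v4 ++ layers.filter (fun l => pvClassify l == "llm_mlp")),
       ("dit_attn", v5 ++ layers.filter (fun l => pvClassify l == "dit_attn")),
       ("dit_mlp", v6 ++ layers.filter (fun l => pvClassify l == "dit_mlp")),
       ("action_head", v7 ++ layers.filter (fun l => pvClassify l == "action_head")),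
       ("other", v8 ++ layers.filter (fun l => pvClassify l == "other"))] := by
  induction layers generalizing v1 v2 v3 v4 v5 v6 v7 v8 with
  | nil => simp
  | cons a rest ih =>
    have hmem := classify_mem a
    unfold pvGroupKeys at hmem
    simp only [List.mem_cons, List.not_mem_nil, or_false] at hmem
    rw [List.foldl_cons]
    rcases hmem with h | h | h | h | h | h | h | h
    · rw [h, pvmod_vlm, ih]
      simp [h]
    · rw [h, pvmod_vision, ih]
      simp [h]
    · rw [h, pvmod_llm_attn, ih]
      simp [h]
    · rw [h, pvmod_llm_mlp, ih]
      simp [h]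
    · rw [h, pvmod_dit_attn, ih]
      simp [h]
    · rw [h, pvmod_dit_mlp, ih]
      simp [h]
    · rw [h, pvmod_action_head, ih]
      simp [h]
    · rw [h, pvmod_other, ih]
      simp [h]

-- ===== VERDICT (by name: the statement is the Claim_ definition above) =====
theorem group_by_component_spec : Claim_equal_group_by_component := by
  intro layers _ _
  unfold Spec_group_by_component group_by_component group_by_component_alt
  have hstep : pvStepA = (fun g l => g.modify (pvClassify l) [] (· ++ [l])) := by
    funext g l; exact stepA_eq_modify_classify g l
  rw [hstep, loop_items]
  simp [pvGroupKeys]
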